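-- pv_equiv track=rewrite | github.com/Abdurakhim254/leetcode_and_ilmhub | substring.py | function
-- ===== SOURCE A (Python) =====
-- def max_string(res):
--     max=[]
--     for x in range(len(res)):
--         if len(max)<len(res[x]):
--             max=res[x]
--     # return max_polindrome(max)
--     return len(max)
--
-- def function(s):
--     res=[]
--     kerak=''
--     for x in range(len(s)-1):
--         if s[x]!=s[x+1]:
--             kerak+=s[x]
--         else:
--             res.append(kerak+s[x])
--             kerak=''
--     kerak+=s[-1]
--     res.append(kerak)
--     for x in range(len(res)):
--         res[x]=list(set(res[x]))
--     # return res
--     return max_string(res)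
-- ===== SOURCE B (Python) =====
-- def function(s):
--     best = 0
--     cur = set()
--     for x in range(len(s) - 1):
--         cur.add(s[x])
--         if s[x] == s[x + 1]:
--             best = max(best, len(cur))
--             cur = set()
--     cur.add(s[-1])
--     return max(best, len(cur))
-- ===== Notes on version B (the rewrite author's own statement) =====
-- stated objective: simpler
-- what changed: Replaces the three passes (build the segment list, convert each segment to a set, scan for the longest) with one streaming loop that keeps only the current segment's character set and the running maximum.
import Mathlib
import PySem

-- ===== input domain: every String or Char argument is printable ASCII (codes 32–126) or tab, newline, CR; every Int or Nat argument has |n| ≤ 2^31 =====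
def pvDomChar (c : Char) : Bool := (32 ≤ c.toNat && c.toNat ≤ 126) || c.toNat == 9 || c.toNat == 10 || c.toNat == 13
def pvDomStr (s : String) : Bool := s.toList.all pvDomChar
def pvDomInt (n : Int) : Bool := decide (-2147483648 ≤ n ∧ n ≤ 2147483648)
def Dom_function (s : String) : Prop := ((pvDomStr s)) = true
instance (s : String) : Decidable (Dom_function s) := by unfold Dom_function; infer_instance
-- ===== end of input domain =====

-- B fuses A's three passes (build segment list, set-convert each segment, max-scan) into one
-- streaming loop keeping only the current segment's character set and the running maximum (simpler).


-- ===== PORT A =====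
def max_string (res : List (List Char)) : Int :=
  let m := (PySem.List.pyRange 0 (res.length : Int) 1).foldl
    (fun (m : List Char) x =>
      let r := PySem.List.pyGetD res x []
      if m.length < r.length then r else m) []
  (m.length : Int)

def function (s : String) : Int :=
  let cs := s.toList
  let st := (PySem.List.pyRange 0 ((cs.length : Int) - 1) 1).foldl
    (fun (st : List (List Char) × List Char) x =>
      let a := PySem.List.pyGetD cs x ' '
      let b := PySem.List.pyGetD cs (x + 1) ' '
      if a ≠ b then (st.1, st.2 ++ [a])
      else (st.1 ++ [st.2 ++ [a]], []))
    ([], [])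
  match PySem.List.pyGet? cs (-1) with
  | none => 0   -- IndexError on the empty string; excluded by Pre_function
  | some c =>
    let res := st.1 ++ [st.2 ++ [c]]
    let res := res.map (fun seg => (PySem.Set.ofList seg : List Char))
    max_string res

-- ===== PORT B =====
def function_alt (s : String) : Int :=
  let cs := s.toList
  let st := (PySem.List.pyRange 0 ((cs.length : Int) - 1) 1).foldl
    (fun (st : Int × PySem.Set Char) x =>
      let a := PySem.List.pyGetD cs x ' '
      let b := PySem.List.pyGetD cs (x + 1) ' '
      let cur := PySem.Set.add st.2 a
      if a = b then (max st.1 (cur.length : Int), PySem.Set.empty)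
      else (st.1, cur))
    (0, PySem.Set.empty)
  match PySem.List.pyGet? cs (-1) with
  | none => 0   -- IndexError on the empty string; excluded by Pre_function
  | some c => max st.1 (((PySem.Set.add st.2 c).length : Int))

-- ===== PRECONDITION & SPEC =====
-- Pre_ excludes only the empty string, on which both Pythons raise IndexError via s[-1].
def Pre_function (s : String) : Prop := s ≠ ""
instance (s : String) : Decidable (Pre_function s) := by unfold Pre_function; infer_instance
def pvWitness_function : String := "aab"

def Spec_function (s : String) (out : Int) : Prop := out = function_alt s
instance (s : String) (out : Int) : Decidable (Spec_function s out) := by unfold Spec_function; infer_instance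

-- ===== CLAIM (what is proved, stated in full; the proofs are below) =====
def Claim_equal_function : Prop := ∀ (s : String), Dom_function s → Pre_function s → Spec_function s (function s)

-- ===== LEMMAS AND PROOFS =====

/-- Generic two-fold simulation: a relation preserved by the two step functions is
preserved by the two folds over the same index list. -/
lemma foldl_rel {α β γ : Type} (f : α → γ → α) (g : β → γ → β) (R : α → β → Prop)
    (h : ∀ a b x, R a b → R (f a x) (g b x)) :
    ∀ (l : List γ) (a : α) (b : β), R a b → R (l.foldl f a) (l.foldl g b) := by
  intro l
  induction l with
  | nil => intro a b hab; exact hab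
  | cons x t ih => intro a b hab; exact ih _ _ (h a b x hab)

/-- set(l + [c]) = set(l).add(c). -/
lemma ofList_append_singleton (l : List Char) (c : Char) :
    PySem.Set.ofList (l ++ [c]) = PySem.Set.add (PySem.Set.ofList l) c := by
  simp [PySem.Set.ofList_eq_foldl, List.foldl_append]

/-- The running "longest element" fold's length is the running max of the lengths. -/
lemma maxstr_len (lst : List (List Char)) : ∀ (m : List Char),
    (((lst.foldl (fun m r => if m.length < r.length then r else m) m).length : Int))
      = lst.foldl (fun b r => max b ((r.length : Int))) ((m.length : Int)) := by
  induction lst with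
  | nil => intro m; rfl
  | cons r t ih =>
    intro m
    simp only [List.foldl_cons]
    rw [ih]
    congr 1
    split_ifs with h
    · omega
    · omega

/-- max_string on a list of segments is the running max of segment lengths. -/
lemma max_string_eq (lst : List (List Char)) :
    max_string lst = lst.foldl (fun b r => max b ((r.length : Int))) 0 := by
  unfold max_string
  rw [PySem.List.foldl_pyRange_zero_pyGetD' lst [] (fun m r => if m.length < r.length then r else m) []]
  exact maxstr_len lst []

/-- The loop invariant: B's running max is A's best-over-res, B's set is the set of A's kerak. -/
def pvRel (u : List (List Char) × List Char) (v : Int × PySem.Set Char) : Prop :=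
  v.1 = u.1.foldl (fun b seg => max b (((PySem.Set.ofList seg : List Char).length : Int))) 0 ∧
  v.2 = PySem.Set.ofList u.2

lemma step_rel (cs : List Char) (u : List (List Char) × List Char) (v : Int × PySem.Set Char)
    (x : Int) (h : pvRel u v) :
    pvRel
      ((fun (st : List (List Char) × List Char) x =>
        let a := PySem.List.pyGetD cs x ' '
        let b := PySem.List.pyGetD cs (x + 1) ' '
        if a ≠ b then (st.1, st.2 ++ [a])
        else (st.1 ++ [st.2 ++ [a]], [])) u x)
      ((fun (st : Int × PySem.Set Char) x =>
        let a := PySem.List.pyGetD cs x ' '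
        let b := PySem.List.pyGetD cs (x + 1) ' '
        let cur := PySem.Set.add st.2 a
        if a = b then (max st.1 (cur.length : Int), PySem.Set.empty)
        else (st.1, cur)) v x) := by
  obtain ⟨h1, h2⟩ := h
  simp only [pvRel]
  by_cases hab : PySem.List.pyGetD cs x ' ' = PySem.List.pyGetD cs (x + 1) ' '
  · simp only [hab, ne_eq, not_true_eq_false, if_false, reduceIte]
    refine ⟨?_, rfl⟩
    rw [h1, h2, List.foldl_append]
    simp only [List.foldl_cons, List.foldl_nil]
    rw [ofList_append_singleton]
  · simp only [ne_eq, hab, not_false_eq_true, if_true, reduceIte]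
    exact ⟨h1, by rw [h2, ofList_append_singleton]⟩

theorem function_eq_alt (s : String) (_hp : Pre_function s) : function s = function_alt s := by
  unfold function function_alt
  have hrel := foldl_rel _ _ pvRel (step_rel s.toList)
      (PySem.List.pyRange 0 ((s.toList.length : Int) - 1) 1) ([], []) (0, PySem.Set.empty)
      ⟨rfl, rfl⟩
  obtain ⟨h1, h2⟩ := hrel
  cases hlast : PySem.List.pyGet? s.toList (-1) with
  | none => simp [hlast]
  | some c =>
    simp only [hlast]
    rw [max_string_eq, List.foldl_map, List.foldl_append]
    simp only [List.foldl_cons, List.foldl_nil]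
    rw [← h1, h2, ofList_append_singleton]

-- ===== VERDICT (by name: the statement is the Claim_ definition above) =====
theorem function_spec : Claim_equal_function := by
  intro s _hd hp
  unfold Spec_function
  exact function_eq_alt s hp
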